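-- pv_equiv track=rewrite | github.com/finderkiller/CrackingCodeInt | ch8/8-4v2.py | converToSubset
-- ===== SOURCE A (Python) =====
-- def converToSubset(value, input):
--     subset = []
--     idx = 0
--     while(value > 0):
--         if value & 1 == 1:
--             subset.append(input[idx])
--         value >>= 1
--         idx += 1
--     return subset
-- ===== SOURCE B (Python) =====
-- def converToSubset(value, input):
--     subset = []
--     while value > 0:
--         low = value & -value          # lowest set bit
--         subset.append(input[low.bit_length() - 1])
--         value &= value - 1            # clear the lowest set bit
--     return subset
-- ===== Notes on version B (the rewrite author's own statement) =====
-- stated objective: alternative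
-- what changed: Replaces A's shift-every-bit loop with a running index counter by Kernighan bit-stripping: each iteration isolates the lowest set bit with value & -value, locates its index via bit_length, and clears it with value &= value - 1, so the loop runs once per SET bit instead of once per bit position.
import Mathlib
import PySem

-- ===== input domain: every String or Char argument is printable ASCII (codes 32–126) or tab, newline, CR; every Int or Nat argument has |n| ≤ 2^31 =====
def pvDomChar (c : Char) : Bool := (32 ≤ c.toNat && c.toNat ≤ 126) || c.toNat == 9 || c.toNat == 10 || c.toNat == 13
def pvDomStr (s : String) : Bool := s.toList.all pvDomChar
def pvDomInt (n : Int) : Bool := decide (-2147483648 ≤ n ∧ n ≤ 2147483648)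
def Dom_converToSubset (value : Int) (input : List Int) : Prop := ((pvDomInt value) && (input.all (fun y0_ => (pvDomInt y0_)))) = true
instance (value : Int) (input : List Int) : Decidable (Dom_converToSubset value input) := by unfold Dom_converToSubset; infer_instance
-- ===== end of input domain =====

-- B replaces A's shift-every-bit loop with Kernighan bit-stripping (one step per SET bit,
-- locating each index via value & -value and bit_length); objective: alternative, same cost class.

-- ===== PORT A =====
-- A's while loop; 'value & 1' on a positive value equals 'value % 2'
def converToSubsetLoop (value : Int) (input : List Int) (idx : Int) (subset : List Int) : List Int :=
  if value > 0 then
    let subset' := if PySem.Int.mod value 2 = 1 then subset ++ [PySem.List.pyGetD input idx 0] else subset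
    converToSubsetLoop (PySem.Int.floordiv value 2) input (idx + 1) subset'
  else subset
termination_by value.toNat
decreasing_by
  rw [PySem.Int.floordiv_eq_ediv_of_pos (by omega)]
  omega

def converToSubset (value : Int) (input : List Int) : List Int :=
  converToSubsetLoop value input 0 []

-- ===== PORT B =====
-- Python's n.bit_length() for n ≥ 0, ported by hand (exact on Nat)
def bitLength (n : Nat) : Nat :=
  if n = 0 then 0 else bitLength (n / 2) + 1

-- Source B's while loop.  The loop runs only while value > 0, so its state is carried as a Nat;
-- on that domain Python's 'value & -value' (lowest set bit) equals v - (v &&& (v-1)) and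
-- 'value &= value - 1' is v &&& (v-1): exact.
def altLoop (v : Nat) (input : List Int) (subset : List Int) : List Int :=
  if v = 0 then subset
  else
    let low := v - (v &&& (v - 1))                       -- low = value & -value
    let subset' := subset ++ [PySem.List.pyGetD input ((bitLength low : Int) - 1) 0]
    altLoop (v &&& (v - 1)) input subset'                -- value &= value - 1
termination_by v
decreasing_by
  have h1 : v &&& (v - 1) ≤ v - 1 := Nat.and_le_right
  omega

def converToSubset_alt (value : Int) (input : List Int) : List Int :=
  altLoop value.toNat input []

-- ===== PRECONDITION & SPEC =====
-- Pre_ excludes exactly the inputs where A raises IndexError: a set bit of value at an index ≥ len(input)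
def Pre_converToSubset (value : Int) (input : List Int) : Prop :=
  value ≤ 0 ∨ value < 2 ^ input.length
instance (value : Int) (input : List Int) : Decidable (Pre_converToSubset value input) := by
  unfold Pre_converToSubset; infer_instance

def pvWitness_converToSubset : Int × List Int := (5, [10, 20, 30])

def Spec_converToSubset (value : Int) (input : List Int) (out : List Int) : Prop := out = converToSubset_alt value input
instance (value : Int) (input : List Int) (out : List Int) : Decidable (Spec_converToSubset value input out) := by unfold Spec_converToSubset; infer_instance

-- ===== CLAIM (what is proved, stated in full; the proofs are below) =====
def Claim_equal_converToSubset : Prop := ∀ (value : Int) (input : List Int), Dom_converToSubset value input → Pre_converToSubset value input → Spec_converToSubset value input (converToSubset value input)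

-- ===== LEMMAS AND PROOFS =====

-- indices of set bits of n, ascending (the common spec both loops are reduced to)
def bitIdx (n : Nat) : List Nat :=
  if n = 0 then []
  else (if n % 2 = 1 then [0] else []) ++ (bitIdx (n / 2)).map (· + 1)

theorem bitIdx_two_mul (m : Nat) : bitIdx (2 * m) = (bitIdx m).map (· + 1) := by
  rw [bitIdx]
  rcases Nat.eq_zero_or_pos m with h | h
  · simp [h, bitIdx]
  · simp [Nat.mul_ne_zero, show (2:Nat) ≠ 0 by omega, show m ≠ 0 by omega,
      Nat.mul_mod_right, Nat.mul_div_cancel_left _ (show 0 < 2 by omega)]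

theorem and_pred_odd (v : Nat) (h : v % 2 = 1) : v &&& (v - 1) = v - 1 := by
  have hv : v = Nat.bit true (v / 2) := by simp [Nat.bit]; omega
  have hv1 : v - 1 = Nat.bit false (v / 2) := by simp [Nat.bit]; omega
  calc v &&& (v - 1) = Nat.bit true (v / 2) &&& Nat.bit false (v / 2) := by rw [← hv, ← hv1]
    _ = Nat.bit (true && false) ((v / 2) &&& (v / 2)) := Nat.land_bit _ _ _ _
    _ = v - 1 := by simp [Nat.bit, Nat.and_self]; omega

theorem and_pred_even (v : Nat) (h0 : v ≠ 0) (h : v % 2 = 0) :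
    v &&& (v - 1) = 2 * ((v / 2) &&& (v / 2 - 1)) := by
  have hv : v = Nat.bit false (v / 2) := by simp [Nat.bit]; omega
  have hv1 : v - 1 = Nat.bit true (v / 2 - 1) := by simp [Nat.bit]; omega
  calc v &&& (v - 1) = Nat.bit false (v / 2) &&& Nat.bit true (v / 2 - 1) := by rw [← hv, ← hv1]
    _ = Nat.bit (false && true) ((v / 2) &&& (v / 2 - 1)) := Nat.land_bit _ _ _ _
    _ = 2 * ((v / 2) &&& (v / 2 - 1)) := by simp [Nat.bit]

theorem bitLength_two_pow (i : Nat) : bitLength (2 ^ i) = i + 1 := by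
  induction i with
  | zero => simp [bitLength]
  | succ i ih =>
      rw [bitLength]
      have h : (2:Nat) ^ (i + 1) ≠ 0 := by positivity
      rw [if_neg h, pow_succ, Nat.mul_div_cancel _ (by omega), ih]

-- the Kernighan step: clearing the lowest set bit removes the head of bitIdx,
-- and the cleared bit is a power of two whose exponent is that head
theorem lowbit_spec : ∀ v : Nat, v ≠ 0 →
    ∃ i, v - (v &&& (v - 1)) = 2 ^ i ∧ bitIdx v = i :: bitIdx (v &&& (v - 1)) := by
  intro v
  induction v using Nat.strong_induction_on with
  | _ v ih =>
    intro hv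
    by_cases hodd : v % 2 = 1
    · refine ⟨0, ?_, ?_⟩
      · rw [and_pred_odd v hodd]; omega
      · rw [and_pred_odd v hodd, bitIdx, if_neg hv, hodd]
        have : v - 1 = 2 * (v / 2) := by omega
        rw [this, bitIdx_two_mul]
        simp
    · have heven : v % 2 = 0 := by omega
      have hk : v / 2 ≠ 0 := by omega
      obtain ⟨i, hpow, hidx⟩ := ih (v / 2) (by omega) hk
      refine ⟨i + 1, ?_, ?_⟩
      · rw [and_pred_even v hv heven, pow_succ]
        have hle : (v / 2) &&& (v / 2 - 1) ≤ v / 2 - 1 := Nat.and_le_right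
        omega
      · rw [and_pred_even v hv heven]
        have hv2 : v = 2 * (v / 2) := by omega
        conv_lhs => rw [hv2]
        rw [bitIdx_two_mul, hidx, bitIdx_two_mul]
        simp

-- B's loop collects input[i] over the set-bit indices, in ascending order
theorem altLoop_eq_bitIdx (input : List Int) :
    ∀ (v : Nat) (acc : List Int),
      altLoop v input acc = acc ++ (bitIdx v).map (fun (i : Nat) => PySem.List.pyGetD input (i : Int) 0) := by
  intro v
  induction v using Nat.strong_induction_on with
  | _ v ih =>
    intro acc
    by_cases hv : v = 0
    · rw [altLoop]; simp [hv, bitIdx]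
    · obtain ⟨i, hpow, hidx⟩ := lowbit_spec v hv
      have hlt : v &&& (v - 1) < v := by
        have : v &&& (v - 1) ≤ v - 1 := Nat.and_le_right
        omega
      rw [altLoop, if_neg hv, ih _ hlt, hidx, hpow, bitLength_two_pow]
      simp

-- shifting the base index by one = selecting over incremented indices
theorem shift_map (input : List Int) (l : List Nat) (idx : Int) :
    l.map (fun (i : Nat) => PySem.List.pyGetD input (idx + 1 + (i : Int)) 0)
      = (l.map (· + 1)).map (fun (i : Nat) => PySem.List.pyGetD input (idx + (i : Int)) 0) := by
  rw [List.map_map]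
  apply List.map_congr_left
  intro i _
  simp only [Function.comp]
  congr 1
  push_cast
  ring

-- A's loop collects input[idx + i] over set-bit indices of the remaining value
theorem loop_eq_bitIdx (input : List Int) :
    ∀ (k : Nat) (value : Int), value.toNat = k → ∀ (idx : Int) (acc : List Int),
      converToSubsetLoop value input idx acc
        = acc ++ (bitIdx value.toNat).map (fun (i : Nat) => PySem.List.pyGetD input (idx + (i : Int)) 0) := by
  intro k
  induction k using Nat.strong_induction_on with
  | _ k ih =>
    intro value hk idx acc
    by_cases hv : value > 0
    · have hfd : PySem.Int.floordiv value 2 = value / 2 :=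
        PySem.Int.floordiv_eq_ediv_of_pos (by omega)
      have hmd : PySem.Int.mod value 2 = value % 2 :=
        PySem.Int.mod_eq_emod_of_pos (by omega)
      have htn : (value / 2).toNat = value.toNat / 2 := by omega
      have hlt : value.toNat / 2 < k := by omega
      rw [converToSubsetLoop, if_pos hv, hfd, hmd, ih _ hlt (value / 2) htn (idx + 1), htn]
      have hbi : bitIdx value.toNat
          = (if value.toNat % 2 = 1 then [0] else []) ++ (bitIdx (value.toNat / 2)).map (· + 1) := by
        rw [bitIdx, if_neg (by omega)]
      rw [hbi]
      by_cases hm : value % 2 = 1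
      · have hm' : value.toNat % 2 = 1 := by omega
        rw [if_pos hm, if_pos hm', shift_map input (bitIdx (value.toNat / 2)) idx]
        simp
      · have hm' : ¬ value.toNat % 2 = 1 := by omega
        rw [if_neg hm, if_neg hm', shift_map input (bitIdx (value.toNat / 2)) idx]
        simp
    · have h0 : value.toNat = 0 := by omega
      rw [converToSubsetLoop, if_neg hv, h0]
      simp [bitIdx]

-- ===== VERDICT (by name: the statement is the Claim_ definition above) =====
theorem converToSubset_spec : Claim_equal_converToSubset := by
  intro value input _ _
  unfold Spec_converToSubset converToSubset converToSubset_alt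
  rw [loop_eq_bitIdx input value.toNat value rfl 0 [], altLoop_eq_bitIdx input value.toNat []]
  simp
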